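-- pv_equiv track=rewrite | github.com/ulb-sachsen-anhalt/ocr-pipeline | lib/ocr_step.py | textlines2data
-- ===== SOURCE A (Python) =====
-- def textlines2data(lines, minlen=2):
--     """Transform text lines after preprocessing into data set"""
--
--     non_empty_lines = [l for l in lines if l.strip()]
--
--     (normalized_lines, n_normalized) = _sanitize_wraps(non_empty_lines)
--     filtered_lines = _sanitize_chars(normalized_lines)
--     n_sparselines = 0
--     dense_lines = []
--     for filtered_line in filtered_lines:
--         # we do not want lines shorter than 2 chars
--         if len(filtered_line) > minlen:
--             dense_lines.append(filtered_line)
--         else: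
--             n_sparselines += 1
--
--     file_string = ' '.join(dense_lines)
--     return (file_string, len(lines), n_normalized,
--             n_sparselines, len(dense_lines))
--
-- def _sanitize_wraps(lines):
--     """Sanitize word wraps if last word token ends with '-' and another line following"""
--
--     normalized = []
--     n_normalized = 0
--     for i, line in enumerate(lines):
--         if i < len(lines) - 1 and line.endswith("-"):
--             next_line_tokens = lines[i + 1].split()
--             nextline_first_token = next_line_tokens.pop(0)
--             lines[i + 1] = ' '.join(next_line_tokens)
--             line = line[:-1] + nextline_first_token
--             n_normalized += 1
--         normalized.append(line)
--     return (normalized, n_normalized)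
--
-- def _sanitize_chars(lines):
--     """Replace or remove nonrelevant chars for current german word error rate"""
--
--     sanitized = []
--     for line in lines:
--         text = line.strip()
--         bad_chars = '0123456789“„"\'?!*.;:-=[]()|'
--         text = ''.join([c for c in text if not c in bad_chars])
--         if '..' in text:
--             text = text.replace('..', '')
--         if '  ' in text:
--             text = text.replace('  ', ' ')
--         if 'ſ' in text:
--             text = text.replace('ſ', 's')
--         text = ' '.join([t for t in text.split() if len(t) > 1])
--         sanitized.append(text)
--
--     return sanitized
-- ===== SOURCE B (Python) =====
-- BAD_CHARS = '0123456789“„"\'?!*.;:-=[]()|'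
--
--
-- def _clean_line(text):
--     """Per-line character sanitize (same rules as the original)"""
--     text = text.strip()
--     text = ''.join([c for c in text if not c in BAD_CHARS])
--     if '..' in text:
--         text = text.replace('..', '')
--     if '  ' in text:
--         text = text.replace('  ', ' ')
--     if 'ſ' in text:
--         text = text.replace('ſ', 's')
--     return ' '.join([t for t in text.split() if len(t) > 1])
--
--
-- def textlines2data(lines, minlen=2):
--     """Single fused pass over the non-empty lines with a carry for wrap joins"""
--     nonempty = [l for l in lines if l.strip()]
--     dense, n_norm, n_sparse = [], 0, 0
--     carry = None
--     for pos, line in enumerate(nonempty):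
--         cur = line if carry is None else carry
--         carry = None
--         if pos + 1 < len(nonempty) and cur.endswith('-'):
--             toks = nonempty[pos + 1].split()
--             cur = cur[:-1] + toks[0]
--             carry = ' '.join(toks[1:])
--             n_norm += 1
--         text = _clean_line(cur)
--         if len(text) > minlen:
--             dense.append(text)
--         else:
--             n_sparse += 1
--     return (' '.join(dense), len(lines), n_norm, n_sparse, len(dense))
-- ===== Notes on version B (the rewrite author's own statement) =====
-- stated objective: alternative
-- what changed: Fuses A's three list passes (wrap-normalization via in-place mutation of the next line, per-line character sanitize, density filter/count) into a single left-to-right loop that carries the rewritten remainder of the next line instead of mutating the list.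
import Mathlib
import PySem

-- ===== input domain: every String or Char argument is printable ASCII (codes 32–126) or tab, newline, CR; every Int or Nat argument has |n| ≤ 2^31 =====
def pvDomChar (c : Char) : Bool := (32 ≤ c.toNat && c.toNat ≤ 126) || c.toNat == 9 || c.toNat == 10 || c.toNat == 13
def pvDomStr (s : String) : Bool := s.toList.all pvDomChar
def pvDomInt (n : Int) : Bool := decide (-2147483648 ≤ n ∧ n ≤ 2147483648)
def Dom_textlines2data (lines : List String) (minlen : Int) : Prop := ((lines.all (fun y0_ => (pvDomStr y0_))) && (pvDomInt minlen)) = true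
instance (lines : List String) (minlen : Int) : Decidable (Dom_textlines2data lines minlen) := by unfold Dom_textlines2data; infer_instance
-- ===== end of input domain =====

-- B fuses A's three list passes (wrap-normalize with in-place mutation, char sanitize, density
-- filter/count) into ONE left-to-right loop with a carry for the wrap joins (same per-line sanitize).

-- ===== PORT A =====
-- per-line character sanitize: the body of A's _sanitize_chars loop (Source B's _clean_line is the
-- identical per-line code, so both ports use this helper)
def pvBadChars : List Char := "0123456789“„\"'?!*.;:-=[]()|".toList

def pvCleanLine (line : String) : String :=
  let text := PySem.Str.strip line
  let text := String.ofList (text.toList.filter (fun c => !(pvBadChars.contains c)))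
  let text := if PySem.Str.isIn ".." text then PySem.Str.replace text ".." "" else text
  let text := if PySem.Str.isIn "  " text then PySem.Str.replace text "  " " " else text
  let text := if PySem.Str.isIn "ſ" text then PySem.Str.replace text "ſ" "s" else text
  PySem.Str.join " " ((PySem.Str.split₀ text).filter (fun t => decide (1 < PySem.Str.len t)))

-- A's _sanitize_wraps: the index loop that mutates lines[i+1] becomes recursion whose head is the
-- (possibly already rewritten) current line; 'next_line_tokens.pop(0)' is headD "" — the token list
-- is non-empty on every input reachable from textlines2data (its lines are pre-filtered non-blank).
def pvWraps : List String → List String × Int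
  | [] => ([], 0)
  | [l] => ([l], 0)
  | l :: next :: rest =>
    if PySem.Str.endswith l "-" then
      let toks := PySem.Str.split₀ next
      let l' := String.ofList ((PySem.Str.slice l none (some (-1))).toList ++ (toks.headD "").toList)
      let next' := PySem.Str.join " " toks.tail
      let r := pvWraps (next' :: rest)
      (l' :: r.1, r.2 + 1)
    else
      let r := pvWraps (next :: rest)
      (l :: r.1, r.2)
  termination_by ls => ls.length

def textlines2data (lines : List String) (minlen : Int) : String × Int × Int × Int × Int :=
  let nonEmpty := lines.filter (fun l => !(PySem.Str.strip l).toList.isEmpty)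
  let nw := pvWraps nonEmpty
  let filtered := nw.1.map pvCleanLine
  let ds := filtered.foldl
    (fun (acc : List String × Int) fl =>
      if minlen < (PySem.Str.len fl : Int) then (acc.1 ++ [fl], acc.2) else (acc.1, acc.2 + 1))
    ([], 0)
  (PySem.Str.join " " ds.1, (lines.length : Int), nw.2, ds.2, (ds.1.length : Int))

-- ===== PORT B =====
-- Source B's fused loop: carry = the rewritten remainder of the next line (none = take the list's line)
def pvFused (minlen : Int) : Option String → List String → List String → Int → Int → List String × Int × Int
  | _, [], dense, nn, ns => (dense, nn, ns)
  | carry, line :: rest, dense, nn, ns =>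
    let cur := carry.getD line
    match rest with
    | [] =>
      let t := pvCleanLine cur
      if minlen < (PySem.Str.len t : Int) then (dense ++ [t], nn, ns) else (dense, nn, ns + 1)
    | nxt :: rest' =>
      if PySem.Str.endswith cur "-" then
        let toks := PySem.Str.split₀ nxt
        let cur' := String.ofList ((PySem.Str.slice cur none (some (-1))).toList ++ (toks.headD "").toList)
        let carry' := some (PySem.Str.join " " toks.tail)
        let t := pvCleanLine cur'
        if minlen < (PySem.Str.len t : Int) then
          pvFused minlen carry' (nxt :: rest') (dense ++ [t]) (nn + 1) ns
        else
          pvFused minlen carry' (nxt :: rest') dense (nn + 1) (ns + 1)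
      else
        let t := pvCleanLine cur
        if minlen < (PySem.Str.len t : Int) then
          pvFused minlen none (nxt :: rest') (dense ++ [t]) nn ns
        else
          pvFused minlen none (nxt :: rest') dense nn (ns + 1)

def textlines2data_alt (lines : List String) (minlen : Int) : String × Int × Int × Int × Int :=
  let nonEmpty := lines.filter (fun l => !(PySem.Str.strip l).toList.isEmpty)
  let r := pvFused minlen none nonEmpty [] 0 0
  (PySem.Str.join " " r.1, (lines.length : Int), r.2.1, r.2.2, (r.1.length : Int))

-- ===== PRECONDITION & SPEC =====
def Spec_textlines2data (lines : List String) (minlen : Int) (out : String × Int × Int × Int × Int) : Prop := out = textlines2data_alt lines minlen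
instance (lines : List String) (minlen : Int) (out : String × Int × Int × Int × Int) : Decidable (Spec_textlines2data lines minlen out) := by unfold Spec_textlines2data; infer_instance

-- ===== CLAIM (what is proved, stated in full; the proofs are below) =====
def Claim_equal_textlines2data : Prop := ∀ (lines : List String) (minlen : Int), Dom_textlines2data lines minlen → Spec_textlines2data lines minlen (textlines2data lines minlen)

-- ===== LEMMAS AND PROOFS =====

-- A's density-filter loop computes (kept lines, count of dropped ones), shifted by the accumulator
theorem pv_foldA (minlen : Int) (fl : List String) (acc : List String × Int) :
    fl.foldl
      (fun (acc : List String × Int) t =>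
        if minlen < (PySem.Str.len t : Int) then (acc.1 ++ [t], acc.2) else (acc.1, acc.2 + 1))
      acc
    = (acc.1 ++ fl.filter (fun t => decide (minlen < (PySem.Str.len t : Int))),
       acc.2 + (fl.countP (fun t => !decide (minlen < (PySem.Str.len t : Int))) : Int)) := by
  induction fl generalizing acc with
  | nil => simp
  | cons t fl ih =>
    simp only [List.foldl_cons, List.filter_cons, List.countP_cons]
    by_cases h : minlen < (PySem.Str.len t : Int) <;>
      simp only [h, ih, decide_true, decide_false, Bool.not_true, Bool.not_false,
        if_true, if_false] <;>
      rw [Prod.mk.injEq] <;>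
      refine ⟨by simp, by push_cast; omega⟩

-- B's fused loop equals A's wrap-normalize + sanitize + density filter/count, shifted by the
-- accumulators; the carried value plays the role of A's mutated lines[i+1]
theorem pv_fused_spec (minlen : Int) :
    ∀ (rest : List String) (carry : Option String) (line : String)
      (dense : List String) (nn ns : Int),
    pvFused minlen carry (line :: rest) dense nn ns
      = (dense ++ ((pvWraps ((carry.getD line) :: rest)).1.map pvCleanLine).filter
            (fun t => decide (minlen < (PySem.Str.len t : Int))),
         nn + (pvWraps ((carry.getD line) :: rest)).2,
         ns + (((pvWraps ((carry.getD line) :: rest)).1.map pvCleanLine).countP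
            (fun t => !decide (minlen < (PySem.Str.len t : Int))) : Int)) := by
  intro rest
  induction rest with
  | nil =>
    intro carry line dense nn ns
    simp only [pvFused, pvWraps, List.map_cons, List.map_nil, List.filter, List.countP]
    by_cases h : minlen < (PySem.Str.len (pvCleanLine (carry.getD line)) : Int)
    · simp only [h, decide_true, if_true, Bool.not_true, List.countP.go, cond_false]
      simp
    · simp only [h, decide_false, if_false, Bool.not_false, List.countP.go, cond_true]
      simp
  | cons nxt rest' ih =>
    intro carry line dense nn ns
    by_cases h : PySem.Str.endswith (carry.getD line) "-" = true
    · simp only [pvFused, pvWraps, h]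
      rw [ih, ih]
      simp only [Option.getD_some, List.map_cons, List.filter_cons, List.countP_cons]
      by_cases h2 : minlen < (PySem.Str.len (pvCleanLine
          (String.ofList ((PySem.Str.slice (carry.getD line) none (some (-1))).toList
            ++ ((PySem.Str.split₀ nxt).headD "").toList))) : Int) <;>
        · simp only [Option.getD_none, List.map_cons, List.filter_cons,
            List.countP_cons, h2, decide_true, decide_false, Bool.not_true, Bool.not_false,
            if_true, if_false]
          rw [Prod.mk.injEq, Prod.mk.injEq]
          refine ⟨by simp, by omega, by push_cast; omega⟩
    · simp only [pvFused, h, Bool.false_eq_true, if_false]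
      rw [ih, ih]
      simp only [pvWraps, h, Bool.false_eq_true, if_false]
      by_cases h2 : minlen < (PySem.Str.len (pvCleanLine (carry.getD line)) : Int) <;>
        · simp only [Option.getD_none, List.map_cons, List.filter_cons,
            List.countP_cons, h2, decide_true, decide_false, Bool.not_true, Bool.not_false,
            if_true, if_false]
          rw [Prod.mk.injEq, Prod.mk.injEq]
          refine ⟨by simp, by omega, by push_cast; omega⟩

-- ===== VERDICT (by name: the statement is the Claim_ definition above) =====
theorem textlines2data_spec : Claim_equal_textlines2data := by
  intro lines minlen _
  unfold Spec_textlines2data textlines2data textlines2data_alt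
  cases h : lines.filter (fun l => !(PySem.Str.strip l).toList.isEmpty) with
  | nil => simp [pvWraps, pvFused]
  | cons l rest =>
    simp only [pv_foldA, pv_fused_spec minlen rest none l [] 0 0, Option.getD_none]
    simp
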